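-- pv_equiv track=rewrite | github.com/chuoer47/AlgorithmLearning | leetcode周赛/第 461 场周赛/平衡装运的最大数量.py | maxBalancedShipments
-- ===== SOURCE A (Python) =====
-- from typing import List
--
-- def maxBalancedShipments(weight: List[int]) -> int:
--     # 线性DP或者贪心
--     # 先暴力思路来一发
--     # dp[i]表示前i个能够形成平衡装运的最大数量
--     # 预处理出来，每一个元素前面比他大的下标即可
--     st = [0]  # 维护一个单调递减的单调栈即可满足条件
--     n = len(weight)
--     dp = [0] * (n + 1)
--     for i in range(1, n):
--         dp[i] = dp[i - 1]
--         while st and weight[st[-1]] <= weight[i]: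
--             st.pop()
--         if st:
--             dp[i] = max(dp[i], dp[st[-1] - 1] + 1)
--         st.append(i)
--
--     return dp[n - 1]
-- ===== SOURCE B (Python) =====
-- from typing import List
--
-- def maxBalancedShipments(weight: List[int]) -> int:
--     # Single greedy pass: close a shipment each time a weight drops strictly
--     # below the running maximum of the current open segment.
--     count = 0
--     cur = None  # max of the open segment; None = segment is empty
--     for w in weight:
--         if cur is not None and w < cur:
--             count += 1
--             cur = None
--         elif cur is None or w > cur:
--             cur = w
--     return count
-- ===== Notes on version B (the rewrite author's own statement) =====
-- stated objective: simpler
-- what changed: Replaced the dp-array-plus-monotonic-stack DP with a single greedy pass that keeps just two scalars (the running maximum of the open segment and a counter), closing a shipment whenever a weight drops strictly below the running maximum.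
import Mathlib
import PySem

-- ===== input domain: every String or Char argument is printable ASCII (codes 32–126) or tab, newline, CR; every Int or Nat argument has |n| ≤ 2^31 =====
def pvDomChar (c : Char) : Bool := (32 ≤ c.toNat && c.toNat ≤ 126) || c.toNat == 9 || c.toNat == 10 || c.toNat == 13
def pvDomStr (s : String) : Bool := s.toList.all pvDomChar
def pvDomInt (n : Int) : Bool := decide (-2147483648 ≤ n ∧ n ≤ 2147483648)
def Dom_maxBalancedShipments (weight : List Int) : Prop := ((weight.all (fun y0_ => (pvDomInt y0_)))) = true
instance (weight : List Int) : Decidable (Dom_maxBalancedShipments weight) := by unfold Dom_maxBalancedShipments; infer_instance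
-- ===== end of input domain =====

-- B replaces A's dp-array-plus-monotonic-stack with a one-pass greedy keeping two scalars (objective: simpler).

-- ===== PORT A =====
-- The Python stack 'st' (append / st[-1] / pop at the end) is represented with its TOP AT THE HEAD
-- of a Lean list; all dp/weight subscripts use PySem.List.pyGetD/pySetD (the default 0 is never
-- reached: every index taken is in Python range, including the dp[-1] wrap when st[-1] = 0).

-- 'while st and weight[st[-1]] <= weight[i]: st.pop()'
def popA (weight : List Int) (wi : Int) : List Int → List Int
  | [] => []
  | j :: rest =>
    if PySem.List.pyGetD weight j 0 ≤ wi then popA weight wi rest else j :: rest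

-- one iteration of 'for i in range(1, n)'
def stepA (weight : List Int) (sd : List Int × List Int) (i : Int) : List Int × List Int :=
  let dp := PySem.List.pySetD sd.2 i (PySem.List.pyGetD sd.2 (i - 1) 0)    -- dp[i] = dp[i-1]
  let st := popA weight (PySem.List.pyGetD weight i 0) sd.1
  let dp :=
    match st with
    | [] => dp
    | j :: _ =>  -- if st: dp[i] = max(dp[i], dp[st[-1] - 1] + 1)
        PySem.List.pySetD dp i (max (PySem.List.pyGetD dp i 0) (PySem.List.pyGetD dp (j - 1) 0 + 1))
  (i :: st, dp)

def maxBalancedShipments (weight : List Int) : Int :=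
  let n : Int := weight.length
  let res := (PySem.List.pyRange 1 n 1).foldl (stepA weight)
      ([0], List.replicate (weight.length + 1) 0)
  PySem.List.pyGetD res.2 (n - 1) 0    -- return dp[n-1]  (n = 0 wraps to dp[-1] = 0)

-- ===== PORT B =====
def stepB (s : Int × Option Int) (w : Int) : Int × Option Int :=
  match s with
  | (cnt, some m) => if w < m then (cnt + 1, none) else (cnt, if m < w then some w else some m)
  | (cnt, none) => (cnt, some w)

def maxBalancedShipments_alt (weight : List Int) : Int :=
  (weight.foldl stepB (0, none)).1

-- ===== PRECONDITION & SPEC =====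
def Spec_maxBalancedShipments (weight : List Int) (out : Int) : Prop := out = maxBalancedShipments_alt weight
instance (weight : List Int) (out : Int) : Decidable (Spec_maxBalancedShipments weight out) := by unfold Spec_maxBalancedShipments; infer_instance

-- ===== CLAIM (what is proved, stated in full; the proofs are below) =====
def Claim_equal_maxBalancedShipments : Prop := ∀ (weight : List Int), Dom_maxBalancedShipments weight → Spec_maxBalancedShipments weight (maxBalancedShipments weight)

-- ===== LEMMAS AND PROOFS =====

-- B's state after the first k elements
def gstate (w : List Int) (k : Nat) : Int × Option Int := (w.take k).foldl stepB (0, none)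
def gcnt (w : List Int) (k : Nat) : Int := (gstate w k).1

-- A's state after the loop has processed i ∈ range(1, iEnd)
def astate (w : List Int) (iEnd : Nat) : List Int × List Int :=
  (PySem.List.pyRange 1 (iEnd : Int) 1).foldl (stepA w) ([0], List.replicate (w.length + 1) 0)

def Wt (w : List Int) (j : Int) : Int := PySem.List.pyGetD w j 0

-- the loop invariant tying A's (st, dp) after i iterations to B's greedy state on the same prefix
def InvA (w : List Int) (i : Nat) : Prop :=
  (astate w i).2.length = w.length + 1 ∧
  (∀ k : Nat, k < i → (astate w i).2.getD k 0 = gcnt w (k + 1)) ∧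
  (∀ k : Nat, i ≤ k → k ≤ w.length → (astate w i).2.getD k 0 = 0) ∧
  (∀ j ∈ (astate w i).1, 0 ≤ j ∧ j < (i : Int) ∧
      ∀ k : Int, j < k → k < (i : Int) → Wt w k < Wt w j) ∧
  (∀ j : Int, 0 ≤ j → j < (i : Int) →
      (∀ k : Int, j < k → k < (i : Int) → Wt w k < Wt w j) → j ∈ (astate w i).1) ∧
  (astate w i).1.Pairwise (· > ·) ∧
  (∃ s : Nat, s ≤ i ∧
    ((gstate w i).2 = none ↔ s = i) ∧
    (∀ m, (gstate w i).2 = some m →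
        (∀ k : Nat, s ≤ k → k < i → Wt w (k : Int) ≤ m) ∧
        (∃ k : Nat, s ≤ k ∧ k < i ∧ Wt w (k : Int) = m)) ∧
    (∀ k : Nat, s ≤ k → k ≤ i → gcnt w k = gcnt w i) ∧
    (s = 0 ∨ gcnt w s = gcnt w (s - 1) + 1))

lemma gstate_succ (w : List Int) (k : Nat) (h : k < w.length) :
    gstate w (k + 1) = stepB (gstate w k) w[k] := by
  unfold gstate
  simp only [List.take_add_one, List.getElem?_eq_getElem h, Option.toList_some,
    List.foldl_append, List.foldl_cons, List.foldl_nil]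

lemma gcnt_succ (w : List Int) (k : Nat) :
    gcnt w (k + 1) = gcnt w k ∨ gcnt w (k + 1) = gcnt w k + 1 := by
  by_cases h : k < w.length
  · unfold gcnt
    rw [gstate_succ w k h]
    rcases gstate w k with ⟨c, mo⟩
    rcases mo with _ | m
    · left; simp [stepB]
    · simp only [stepB]
      split_ifs <;> simp
  · left
    unfold gcnt gstate
    rw [List.take_of_length_le (by omega), List.take_of_length_le (by omega)]

lemma gcnt_mono (w : List Int) {k k' : Nat} (h : k ≤ k') : gcnt w k ≤ gcnt w k' := by
  induction k' with
  | zero =>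
    have : k = 0 := by omega
    simp [this]
  | succ m ih =>
    rcases Nat.lt_or_ge k (m + 1) with hlt | hge
    · have := ih (by omega)
      rcases gcnt_succ w m with he | he <;> omega
    · have : k = m + 1 := by omega
      subst this; exact le_refl _

lemma astate_succ (w : List Int) (i : Nat) (h : 1 ≤ i) :
    astate w (i + 1) = stepA w (astate w i) (i : Int) := by
  unfold astate
  have : ((i + 1 : Nat) : Int) = (i : Int) + 1 := by push_cast; ring
  rw [this, PySem.List.pyRange_one_succ_right (by exact_mod_cast h), List.foldl_append]
  simp

lemma popA_decomp (w : List Int) (wi : Int) (st : List Int) :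
    ∃ popped, st = popped ++ popA w wi st ∧ ∀ p ∈ popped, PySem.List.pyGetD w p 0 ≤ wi := by
  induction st with
  | nil => exact ⟨[], by simp [popA]⟩
  | cons j rest ih =>
    by_cases hj : PySem.List.pyGetD w j 0 ≤ wi
    · obtain ⟨pop, he, hle⟩ := ih
      refine ⟨j :: pop, ?_, ?_⟩
      · simp [popA, hj]; exact he
      · intro p hp
        rcases List.mem_cons.mp hp with rfl | hp
        · exact hj
        · exact hle p hp
    · exact ⟨[], by simp [popA, hj]⟩

lemma popA_head (w : List Int) (wi : Int) (st : List Int) (j : Int) (rest : List Int)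
    (h : popA w wi st = j :: rest) : wi < PySem.List.pyGetD w j 0 := by
  induction st with
  | nil => simp [popA] at h
  | cons a tl ih =>
    by_cases ha : PySem.List.pyGetD w a 0 ≤ wi
    · exact ih (by simpa [popA, ha] using h)
    · simp only [popA, if_neg ha, List.cons.injEq] at h
      obtain ⟨rfl, rfl⟩ := h
      omega

lemma invA_base (w : List Int) (h : 1 ≤ w.length) : InvA w 1 := by
  have h0 : 0 < w.length := h
  have ha : astate w 1 = ([0], List.replicate (w.length + 1) 0) := by
    unfold astate
    rw [show ((1 : Nat) : Int) = 1 by norm_num, PySem.List.pyRange_one_eq_nil (le_refl 1)]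
    rfl
  have hg : gstate w 1 = ((0 : Int), some w[0]) := by
    rw [show (1 : Nat) = 0 + 1 from rfl, gstate_succ w 0 h0]
    rfl
  have hw0 : Wt w 0 = w[0] := by
    simp [Wt, PySem.List.pyGetD_zero, List.getD_eq_getElem?_getD, List.getElem?_eq_getElem h0]
  refine ⟨?_, ?_, ?_, ?_, ?_, ?_, 0, ?_, ?_, ?_, ?_, Or.inl rfl⟩
  · rw [ha]; simp
  · intro k hk
    have : k = 0 := by omega
    subst this
    rw [ha]
    simp [gcnt, hg]
  · intro k _ _
    rw [ha]
    simp
  · intro j hj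
    rw [ha] at hj
    simp at hj
    subst hj
    exact ⟨le_refl _, by norm_num, by intro k h1 h2; omega⟩
  · intro j hj0 hj1 _
    rw [ha]
    simp
    omega
  · rw [ha]; simp
  · omega
  · rw [hg]; simp
  · intro m hm
    rw [hg] at hm
    simp at hm
    subst hm
    constructor
    · intro k _ hk
      have : k = 0 := by omega
      subst this
      rw [show ((0 : Nat) : Int) = 0 by norm_num, hw0]
    · exact ⟨0, le_refl _, by omega, by rw [show ((0 : Nat) : Int) = 0 by norm_num, hw0]⟩
  · intro k _ hk
    interval_cases k
    · simp [gcnt, gstate]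
      rw [show (1 : Nat) = 0 + 1 from rfl, List.take_add_one, List.getElem?_eq_getElem h0]
      simp [stepB]
    · rfl


lemma getD_set_lt (xs : List Int) (a : Nat) (v : Int) (k : Nat) (h : a < xs.length) :
    (xs.set a v).getD k 0 = if k = a then v else xs.getD k 0 := by
  by_cases hk : k = a
  · subst hk
    simp [List.getD_eq_getElem?_getD, h]
  · rw [if_neg hk]
    simp only [List.getD_eq_getElem?_getD, List.getElem?_set]
    rw [if_neg (fun hh => hk hh.symm)]

lemma pyGetD_nonneg_toNat (xs : List Int) (a : Int) (h : 0 ≤ a) :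
    PySem.List.pyGetD xs a 0 = xs.getD a.toNat 0 := by
  have ha : a = ((a.toNat : Nat) : Int) := by omega
  conv_lhs => rw [ha]
  rw [PySem.List.pyGetD_natCast]

lemma Wt_nat (w : List Int) (k : Nat) (h : k < w.length) : Wt w (k : Int) = w[k] := by
  rw [Wt, PySem.List.pyGetD_natCast]
  exact List.getD_eq_getElem w 0 h

lemma invA_step (w : List Int) (i : Nat) (h1 : 1 ≤ i) (h2 : i + 1 ≤ w.length)
    (ih : InvA w i) : InvA w (i + 1) := by
  obtain ⟨hlen, hdpA, hdpB, hstA, hstB, hsort, s, hsle, hiff, hsome, hconst, hlast⟩ := ih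
  have hin : i < w.length := by omega
  set n := w.length with hn
  set st := (astate w i).1 with hst
  set dp := (astate w i).2 with hdp
  set c := gcnt w i with hc
  set wi := PySem.List.pyGetD w (i : Int) 0 with hwidef
  have hwiv : wi = w[i] := by
    rw [hwidef, PySem.List.pyGetD_natCast]
    exact List.getD_eq_getElem w 0 hin
  have hwiW : Wt w (i : Int) = wi := rfl
  -- pop step
  set st' := popA w wi st with hst'
  obtain ⟨popped, hdecomp, hpopped⟩ := popA_decomp w wi st
  have hsub : st'.Sublist st := by
    rw [hdecomp]
    exact List.sublist_append_right popped st'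
  have hsort' : st'.Pairwise (· > ·) := hsort.sublist hsub
  have hmemst' : ∀ x ∈ st', x ∈ st := fun x hx => hsub.mem hx
  have hmem_gt : ∀ x ∈ st', wi < Wt w x := by
    intro x hx
    rcases hcons : st' with _ | ⟨j, rest⟩
    · rw [hcons] at hx; simp at hx
    · have hjgt : wi < Wt w j := popA_head w wi st j rest (hst' ▸ hcons)
      rw [hcons] at hx
      rcases List.mem_cons.mp hx with rfl | hxr
      · exact hjgt
      · have hxj : x < j := by
          have := (List.pairwise_cons.mp (hcons ▸ hsort')).1 x hxr
          exact this
        obtain ⟨hx0, hxi, hxchar⟩ := hstA x (hmemst' x (hcons ▸ List.mem_cons_of_mem j hxr))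
        obtain ⟨-, hji, -⟩ := hstA j (hmemst' j (hcons ▸ List.mem_cons_self))
        have := hxchar j hxj hji
        omega
  have hnotpop : ∀ x ∈ st, wi < Wt w x → x ∈ st' := by
    intro x hx hgt
    rw [hdecomp] at hx
    rcases List.mem_append.mp hx with hp | hok
    · have := hpopped x hp
      have : Wt w x ≤ wi := this
      omega
    · exact hok
  -- dp step
  have hdpi1 : PySem.List.pyGetD dp ((i : Int) - 1) 0 = c := by
    have hcast : (i : Int) - 1 = ((i - 1 : Nat) : Int) := by omega
    rw [hcast, PySem.List.pyGetD_natCast, List.getD_eq_getElem?_getD]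
    rw [← List.getD_eq_getElem?_getD, hdpA (i - 1) (by omega)]
    congr 1
    omega
  set dp1 := PySem.List.pySetD dp (i : Int) (PySem.List.pyGetD dp ((i : Int) - 1) 0) with hdp1def
  have hdp1eq : dp1 = dp.set i c := by
    rw [hdp1def, hdpi1, PySem.List.pySetD_natCast]
  have hlen1 : dp1.length = n + 1 := by rw [hdp1eq]; simp [hlen]
  have hget1 : ∀ k : Nat, dp1.getD k 0 = if k = i then c else dp.getD k 0 := by
    intro k
    rw [hdp1eq]
    exact getD_set_lt dp i c k (by omega)
  have hdpAt : ∀ j : Int, 0 ≤ j → j < (i : Int) →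
      PySem.List.pyGetD dp1 (j - 1) 0 = gcnt w j.toNat := by
    intro j hj0 hji
    by_cases hj : j = 0
    · subst hj
      have hne : dp1 ≠ [] := by
        intro hcon; rw [hcon] at hlen1; simp at hlen1
      rw [show (0 : Int) - 1 = -1 by ring]
      rw [PySem.List.pyGetD_neg_ofNat dp1 1 0 (by omega) (by omega)]
      have h00 : gcnt w (0 : Int).toNat = 0 := rfl
      rw [h00, ← List.getD_eq_getElem dp1 0 (by omega)]
      rw [hget1 (dp1.length - 1), if_neg (by omega)]
      exact hdpB (dp1.length - 1) (by omega) (by omega)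
    · have hcast : j - 1 = ((j.toNat - 1 : Nat) : Int) := by omega
      rw [hcast, PySem.List.pyGetD_natCast, List.getD_eq_getElem?_getD, ← List.getD_eq_getElem?_getD]
      rw [hget1 (j.toNat - 1), if_neg (by omega)]
      rw [hdpA (j.toNat - 1) (by omega)]
      congr 1
      omega
  -- the new A state
  have hA1 : (astate w (i + 1)).1 = (i : Int) :: st' := by
    rw [astate_succ w i h1]
    rfl
  have hA2nil : st' = [] → (astate w (i + 1)).2 = dp1 := by
    intro hcons
    have hc' : popA w (PySem.List.pyGetD w (i : Int) 0) (astate w i).1 = [] := hcons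
    rw [astate_succ w i h1]
    unfold stepA
    simp only [hc']
    rfl
  have hA2cons : ∀ j rest, st' = j :: rest → (astate w (i + 1)).2 =
      PySem.List.pySetD dp1 (i : Int)
        (max (PySem.List.pyGetD dp1 (i : Int) 0) (PySem.List.pyGetD dp1 (j - 1) 0 + 1)) := by
    intro j rest hcons
    have hc' : popA w (PySem.List.pyGetD w (i : Int) 0) (astate w i).1 = j :: rest := hcons
    rw [astate_succ w i h1]
    unfold stepA
    simp only [hc']
    rfl
  -- the new B state
  have hpair : gstate w i = (c, (gstate w i).2) := rfl
  have hgs : gstate w (i + 1) = stepB (c, (gstate w i).2) w[i] := by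
    rw [gstate_succ w i hin, ← hpair]
  -- dp2 facts (case analysis): value at i is gcnt w (i+1), elsewhere unchanged
  -- new dp: length and unchanged entries
  have hdp2len : (astate w (i + 1)).2.length = n + 1 := by
    rcases hcons : st' with _ | ⟨j, rest⟩
    · rw [hA2nil hcons]; exact hlen1
    · rw [hA2cons j rest hcons, PySem.List.pySetD_natCast]; simp [hlen1]
  have hdp2ne : ∀ k : Nat, k ≠ i → (astate w (i + 1)).2.getD k 0 = dp.getD k 0 := by
    intro k hk
    rcases hcons : st' with _ | ⟨j, rest⟩
    · rw [hA2nil hcons, hget1 k, if_neg hk]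
    · rw [hA2cons j rest hcons, PySem.List.pySetD_natCast]
      rw [getD_set_lt dp1 i _ k (by omega), if_neg hk, hget1 k, if_neg hk]
  have hdp2i_cons : ∀ j rest, st' = j :: rest →
      (astate w (i + 1)).2.getD i 0 = max c (gcnt w j.toNat + 1) := by
    intro j rest hcons
    obtain ⟨hj0, hji, -⟩ := hstA j (hmemst' j (hcons ▸ List.mem_cons_self))
    rw [hA2cons j rest hcons, PySem.List.pySetD_natCast]
    rw [getD_set_lt dp1 i _ i (by omega), if_pos rfl]
    rw [hdpAt j hj0 hji]
    rw [pyGetD_nonneg_toNat dp1 (i : Int) (by positivity)]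
    simp only [Int.toNat_natCast]
    rw [hget1 i, if_pos rfl]
  -- in the close case the popped stack is nonempty and its top lies in the current segment
  have hclose : ∀ m, (gstate w i).2 = some m → w[i] < m →
      ∃ j rest, st' = j :: rest ∧ (s : Int) ≤ j := by
    intro m hcur hlt
    obtain ⟨hbnd, k0, hk0s, hk0i, hk0w⟩ := hsome m hcur
    have hPk0 : wi < Wt w (k0 : Int) := by rw [hk0w, hwiv]; exact hlt
    set jn := Nat.findGreatest (fun t => wi < Wt w (t : Int)) (i - 1) with hjn
    have hjnspec : wi < Wt w (jn : Int) :=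
      Nat.findGreatest_spec (P := fun t => wi < Wt w (t : Int)) (by omega : k0 ≤ i - 1) hPk0
    have hjnge : k0 ≤ jn := Nat.le_findGreatest (by omega) hPk0
    have hjnle : jn ≤ i - 1 := Nat.findGreatest_le (i - 1)
    have hjmem : (jn : Int) ∈ st := by
      apply hstB _ (by positivity) (by omega)
      intro k hk1 hk2
      have hnP : ¬ wi < Wt w ((k.toNat : Nat) : Int) := by
        apply Nat.findGreatest_is_greatest (n := i - 1) (P := fun t => wi < Wt w (t : Int)) ?_ (by omega)
        rw [← hjn]
        omega
      have hkk : k = ((k.toNat : Nat) : Int) := by omega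
      rw [hkk]
      omega
    have hjst' : (jn : Int) ∈ st' := hnotpop _ hjmem hjnspec
    rcases hcons : st' with _ | ⟨j, rest⟩
    · rw [hcons] at hjst'; simp at hjst'
    · refine ⟨j, rest, rfl, ?_⟩
      rw [hcons] at hjst'
      rcases List.mem_cons.mp hjst' with heq | hr
      · omega
      · have := (List.pairwise_cons.mp (hcons ▸ hsort')).1 _ hr
        omega
  -- in the no-close case the surviving top is older than the current segment
  have hnoclose_top : ∀ j rest, st' = j :: rest →
      ((gstate w i).2 = none ∨ (∃ m, (gstate w i).2 = some m ∧ ¬ w[i] < m)) →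
      gcnt w j.toNat + 1 ≤ c := by
    intro j rest hcons hcase
    obtain ⟨hj0, hji, -⟩ := hstA j (hmemst' j (hcons ▸ List.mem_cons_self))
    have hjlt : j < (s : Int) := by
      rcases hcase with hnone | ⟨m, hcur, hge⟩
      · have : s = i := hiff.mp hnone
        omega
      · by_contra hcon
        push Not at hcon
        obtain ⟨hbnd, -⟩ := hsome m hcur
        have hb : Wt w ((j.toNat : Nat) : Int) ≤ m := hbnd j.toNat (by omega) (by omega)
        have hgt : wi < Wt w j := hmem_gt j (hcons ▸ List.mem_cons_self)
        have hjj : j = ((j.toNat : Nat) : Int) := by omega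
        rw [← hjj] at hb
        rw [hwiv] at hgt
        omega
    have hs1 : 1 ≤ s := by omega
    rcases hlast with h0 | hlasteq
    · omega
    · have hm1 : gcnt w j.toNat ≤ gcnt w (s - 1) := gcnt_mono w (by omega)
      have hm2 : gcnt w s = c := hconst s le_rfl hsle
      omega
  -- the combined per-case fact: the dp entry written at i equals the new greedy count,
  -- and the greedy segment invariant is re-established
  have hmain : (astate w (i + 1)).2.getD i 0 = gcnt w (i + 1) ∧
      (∃ s' : Nat, s' ≤ i + 1 ∧
        ((gstate w (i + 1)).2 = none ↔ s' = i + 1) ∧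
        (∀ m', (gstate w (i + 1)).2 = some m' →
            (∀ k : Nat, s' ≤ k → k < i + 1 → Wt w (k : Int) ≤ m') ∧
            (∃ k : Nat, s' ≤ k ∧ k < i + 1 ∧ Wt w (k : Int) = m')) ∧
        (∀ k : Nat, s' ≤ k → k ≤ i + 1 → gcnt w k = gcnt w (i + 1)) ∧
        (s' = 0 ∨ gcnt w s' = gcnt w (s' - 1) + 1)) := by
    rcases hcur : (gstate w i).2 with _ | m
    · -- open segment is empty: never a close (s = i)
      have hseq : s = i := hiff.mp hcur
      have hg : gstate w (i + 1) = (c, some w[i]) := by rw [hgs, hcur]; rfl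
      have hc1 : gcnt w (i + 1) = c := by show (gstate w (i + 1)).1 = c; rw [hg]
      have hg2 : (gstate w (i + 1)).2 = some w[i] := by rw [hg]
      constructor
      · rcases hcons : st' with _ | ⟨j, rest⟩
        · rw [hA2nil hcons, hget1 i, if_pos rfl, hc1]
        · rw [hdp2i_cons j rest hcons, hc1]
          have := hnoclose_top j rest hcons (Or.inl hcur)
          omega
      · refine ⟨s, by omega, ?_, ?_, ?_, ?_⟩
        · rw [hg2]; simp; omega
        · intro m' hm'
          rw [hg2] at hm'
          injection hm' with hm'
          subst hm'
          constructor
          · intro k hk1 hk2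
            have hki : k = i := by omega
            rw [hki, Wt_nat w i hin]
          · exact ⟨i, by omega, by omega, Wt_nat w i hin⟩
        · intro k hk1 hk2
          rw [hc1]
          rcases Nat.lt_or_ge k (i + 1) with hki | hki
          · exact hconst k hk1 (by omega)
          · have : k = i + 1 := by omega
            subst this
            rw [hc1]
        · rcases hlast with h0 | hl
          · omega
          · exact Or.inr hl
    · by_cases hlt : w[i] < m
      · -- close: a shipment ends at i
        have hg : gstate w (i + 1) = (c + 1, none) := by
          rw [hgs, hcur]
          simp only [stepB]
          rw [if_pos hlt]
        have hc1 : gcnt w (i + 1) = c + 1 := by show (gstate w (i + 1)).1 = c + 1; rw [hg]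
        have hg2 : (gstate w (i + 1)).2 = none := by rw [hg]
        obtain ⟨j, rest, hcons, hjs⟩ := hclose m hcur hlt
        obtain ⟨hj0, hji, -⟩ := hstA j (hmemst' j (hcons ▸ List.mem_cons_self))
        constructor
        · rw [hdp2i_cons j rest hcons, hc1]
          have hcj : gcnt w j.toNat = c := hconst j.toNat (by omega) (by omega)
          rw [hcj]
          omega
        · refine ⟨i + 1, le_rfl, by rw [hg2]; simp, ?_, ?_, Or.inr ?_⟩
          · intro m' hm'
            rw [hg2] at hm'
            cases hm'
          · intro k hk1 hk2
            have : k = i + 1 := by omega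
            subst this
            rfl
          · have : i + 1 - 1 = i := by omega
            rw [this, hc1]
      · -- no close: the running maximum is updated
        have hg : gstate w (i + 1) = (c, if m < w[i] then some w[i] else some m) := by
          rw [hgs, hcur]
          simp only [stepB]
          rw [if_neg hlt]
        have hc1 : gcnt w (i + 1) = c := by show (gstate w (i + 1)).1 = c; rw [hg]
        have hg2 : (gstate w (i + 1)).2 = if m < w[i] then some w[i] else some m := by rw [hg]
        have hsne : s ≠ i := by
          intro hcon
          rw [hiff.mpr hcon] at hcur
          cases hcur
        obtain ⟨hbnd, k0, hk0s, hk0i, hk0w⟩ := hsome m hcur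
        constructor
        · rcases hcons : st' with _ | ⟨j, rest⟩
          · rw [hA2nil hcons, hget1 i, if_pos rfl, hc1]
          · rw [hdp2i_cons j rest hcons, hc1]
            have := hnoclose_top j rest hcons (Or.inr ⟨m, hcur, hlt⟩)
            omega
        · refine ⟨s, by omega, ?_, ?_, ?_, ?_⟩
          · constructor
            · intro hcon
              rw [hg2] at hcon
              by_cases hmlt : m < w[i] <;> simp [hmlt] at hcon
            · intro hcon
              omega
          · intro m' hm'
            rw [hg2] at hm'
            by_cases hmlt : m < w[i]
            · rw [if_pos hmlt] at hm'
              injection hm' with hm'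
              subst hm'
              constructor
              · intro k hk1 hk2
                rcases Nat.lt_or_ge k i with hki | hki
                · have := hbnd k hk1 hki
                  omega
                · have hki : k = i := by omega
                  rw [hki, Wt_nat w i hin]
              · exact ⟨i, by omega, by omega, Wt_nat w i hin⟩
            · rw [if_neg hmlt] at hm'
              injection hm' with hm'
              subst hm'
              constructor
              · intro k hk1 hk2
                rcases Nat.lt_or_ge k i with hki | hki
                · exact hbnd k hk1 hki
                · have hki : k = i := by omega
                  rw [hki, Wt_nat w i hin]
                  omega
              · exact ⟨k0, hk0s, by omega, hk0w⟩
          · intro k hk1 hk2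
            rw [hc1]
            rcases Nat.lt_or_ge k (i + 1) with hki | hki
            · exact hconst k hk1 (by omega)
            · have : k = i + 1 := by omega
              subst this
              rw [hc1]
          · exact hlast
  have key : (astate w (i + 1)).2.length = n + 1 ∧
      (∀ k : Nat, k ≠ i → (astate w (i + 1)).2.getD k 0 = dp.getD k 0) ∧
      (astate w (i + 1)).2.getD i 0 = gcnt w (i + 1) :=
    ⟨hdp2len, hdp2ne, hmain.1⟩
  obtain ⟨klen, kne, ki⟩ := key
  refine ⟨klen, ?_, ?_, ?_, ?_, ?_, ?_⟩
  · intro k hk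
    by_cases hki : k = i
    · subst hki; exact ki
    · rw [kne k hki]
      exact hdpA k (by omega)
  · intro k hk1 hk2
    rw [kne k (by omega)]
    exact hdpB k (by omega) hk2
  · -- stack soundness
    intro j hj
    rw [hA1] at hj
    rcases List.mem_cons.mp hj with rfl | hj'
    · refine ⟨by positivity, by push_cast; omega, ?_⟩
      intro k hk1 hk2
      push_cast at hk2
      omega
    · obtain ⟨h0, hlti, hchar⟩ := hstA j (hmemst' j hj')
      refine ⟨h0, by push_cast; omega, ?_⟩
      intro k hk1 hk2
      push_cast at hk2
      rcases lt_or_eq_of_le (by omega : k ≤ (i : Int)) with hki | hki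
      · exact hchar k hk1 hki
      · subst hki
        rw [hwiW]
        exact hmem_gt j hj'
  · -- stack completeness
    intro j hj0 hji hchar
    rw [hA1]
    push_cast at hji
    rcases lt_or_eq_of_le (by omega : j ≤ (i : Int)) with hlt | heq
    · have hjst : j ∈ st := by
        apply hstB j hj0 hlt
        intro k hk1 hk2
        exact hchar k hk1 (by push_cast; omega)
      have hgt : wi < Wt w j := by
        rw [← hwiW]
        exact hchar (i : Int) hlt (by push_cast; omega)
      exact List.mem_cons_of_mem _ (hnotpop j hjst hgt)
    · subst heq
      exact List.mem_cons_self
  · -- pairwise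
    rw [hA1]
    refine List.pairwise_cons.mpr ⟨?_, hsort'⟩
    intro x hx
    exact (hstA x (hmemst' x hx)).2.1
  · -- segment invariant
    exact hmain.2


lemma invA_all (w : List Int) (i : Nat) (h1 : 1 ≤ i) (h2 : i ≤ w.length) : InvA w i := by
  induction i with
  | zero => omega
  | succ m ih =>
    rcases Nat.lt_or_ge 1 (m + 1) with hlt | hge
    · exact invA_step w m (by omega) h2 (ih (by omega) (by omega))
    · have : m = 0 := by omega
      subst this
      exact invA_base w h2

-- ===== VERDICT (by name: the statement is the Claim_ definition above) =====
theorem maxBalancedShipments_spec : Claim_equal_maxBalancedShipments := by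
  unfold Claim_equal_maxBalancedShipments
  intro w _
  unfold Spec_maxBalancedShipments
  rcases Nat.eq_zero_or_pos w.length with h0 | hpos
  · have : w = [] := List.length_eq_zero_iff.mp h0
    subst this
    decide
  · obtain ⟨_, hdp, -⟩ := invA_all w w.length hpos (le_refl _)
    have hret : maxBalancedShipments w = (astate w w.length).2.getD (w.length - 1) 0 := by
      unfold maxBalancedShipments astate
      dsimp only
      have hcast : (w.length : Int) - 1 = ((w.length - 1 : Nat) : Int) := by
        push_cast [Nat.cast_sub hpos]; ring
      rw [hcast, PySem.List.pyGetD_natCast]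
    have halt : maxBalancedShipments_alt w = gcnt w w.length := by
      unfold maxBalancedShipments_alt gcnt gstate
      rw [List.take_of_length_le (le_refl _)]
    rw [hret, halt, hdp (w.length - 1) (by omega)]
    congr 1
    omega
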